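-- pv_equiv track=rewrite | github.com/WpythonW/Diploma | experiments_raw_results/wason-2-4-6/run_experiments.py | normalize_provider_list
-- ===== SOURCE A (Python) =====
-- def normalize_provider_list(values: list[str] | None) -> list[str] | None:
--     if not values:
--         return None
--     normalized: list[str] = []
--     for value in values:
--         parts = [part.strip().lower() for part in value.split(",")]
--         normalized.extend(part for part in parts if part)
--     return normalized or None
-- ===== SOURCE B (Python) =====
-- def normalize_provider_list(values: list[str] | None) -> list[str] | None:
--     # single character-level scan: state machine with a token buffer and pending
--     # interior whitespace; no split/strip/lower string-library passes
--     if not values: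
--         return None
--     out: list[str] = []
--     for value in values:
--         buf: list[str] = []   # current token, already lower-cased, left-stripped
--         pend: list[str] = []  # whitespace seen after token chars, not yet committed
--         for ch in value:
--             if ch == ',':
--                 if buf:
--                     out.append(''.join(buf))
--                 buf = []
--                 pend = []
--             elif ch.isspace():
--                 if buf:
--                     pend.append(ch)
--             else:
--                 buf.extend(pend)
--                 pend = []
--                 buf.append(ch.lower())
--         if buf:
--             out.append(''.join(buf))
--     return out or None
-- ===== Notes on version B (the rewrite author's own statement) =====
-- stated objective: alternative
-- what changed: Replaces A's per-element split/strip/lower/filter string-library pipeline by a single character-level state machine that scans each string once, maintaining a token buffer and a pending-whitespace buffer (flushed on comma, whitespace dropped at token edges, characters lower-cased as they arrive).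
import Mathlib
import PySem

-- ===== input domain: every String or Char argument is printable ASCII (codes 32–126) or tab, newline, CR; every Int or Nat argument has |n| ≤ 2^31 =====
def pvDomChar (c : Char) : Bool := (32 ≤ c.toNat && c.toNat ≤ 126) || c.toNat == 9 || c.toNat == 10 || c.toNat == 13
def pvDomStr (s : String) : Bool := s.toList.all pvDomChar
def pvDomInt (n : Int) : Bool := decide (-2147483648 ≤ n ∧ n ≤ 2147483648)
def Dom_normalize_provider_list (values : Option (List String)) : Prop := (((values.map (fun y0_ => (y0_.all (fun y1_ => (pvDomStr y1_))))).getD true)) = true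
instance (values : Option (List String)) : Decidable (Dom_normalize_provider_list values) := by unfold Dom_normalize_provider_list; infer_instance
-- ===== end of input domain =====

-- B replaces A's per-element split/strip/lower/filter library pipeline by a single
-- character-level state machine (token buffer + pending whitespace) (objective: alternative).

-- ===== PORT A =====
-- per-element pipeline: [part.strip().lower() for part in value.split(",")], keep non-empty
def normalize_provider_list (values : Option (List String)) : Option (List String) :=
  match values with
  | none => none
  | some vs =>
    if vs.isEmpty then none
    else
      let normalized : List String := vs.foldl (fun acc value =>
        let parts := (PySem.Chars.splitOn value.toList [',']).map
          (fun part => PySem.Chars.lower (PySem.Chars.strip part))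
        acc ++ (parts.filter (fun part => !part.isEmpty)).map String.ofList) []
      if normalized.isEmpty then none else some normalized

-- ===== PORT B =====
-- one step of the character state machine: state = (out, buf, pend)
def npl_step (st : List String × List Char × List Char) (ch : Char) :
    List String × List Char × List Char :=
  let (out, buf, pend) := st
  if ch = ',' then
    ((if buf.isEmpty then out else out ++ [String.ofList buf]), [], [])
  else if PySem.Chars.isspace ch then
    (out, buf, if buf.isEmpty then pend else pend ++ [ch])
  else
    (out, buf ++ pend ++ [PySem.Chars.lowerChar ch], [])

-- scan one value character by character, then flush the last token
def npl_scanValue (out : List String) (value : String) : List String :=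
  let st := value.toList.foldl npl_step (out, [], [])
  if st.2.1.isEmpty then st.1 else st.1 ++ [String.ofList st.2.1]

def normalize_provider_list_alt (values : Option (List String)) : Option (List String) :=
  match values with
  | none => none
  | some vs =>
    if vs.isEmpty then none
    else
      let out := vs.foldl npl_scanValue []
      if out.isEmpty then none else some out

-- ===== PRECONDITION & SPEC =====
def Spec_normalize_provider_list (values : Option (List String)) (out : Option (List String)) : Prop := out = normalize_provider_list_alt values
instance (values : Option (List String)) (out : Option (List String)) : Decidable (Spec_normalize_provider_list values out) := by unfold Spec_normalize_provider_list; infer_instance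

-- ===== CLAIM (what is proved, stated in full; the proofs are below) =====
def Claim_equal_normalize_provider_list : Prop := ∀ (values : Option (List String)), Dom_normalize_provider_list values → Spec_normalize_provider_list values (normalize_provider_list values)

-- ===== LEMMAS AND PROOFS =====

-- what A contributes for a list of comma-fields
def npl_emit (fs : List (List Char)) : List String :=
  ((fs.map (fun part => PySem.Chars.lower (PySem.Chars.strip part))).filter
    (fun part => !part.isEmpty)).map String.ofList

-- the whitespace suffix of the left-stripped current raw token (= B's pend buffer)
def npl_pend (cur : List Char) : List Char :=
  ((PySem.Chars.lstrip cur).reverse.takeWhile PySem.Chars.isspace).reverse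

-- PySem's fuelled splitter on a one-character separator is Mathlib's splitOnP
theorem splitOn_go_eq (c : Char) :
    ∀ (fuel : Nat) (l cur : List Char) (acc : List (List Char)), l.length < fuel →
      PySem.Chars.splitOn.go [c] fuel l cur acc =
        acc.reverse ++ (List.splitOnP (· == c) l).modifyHead (cur.reverse ++ ·) := by
  intro fuel
  induction fuel with
  | zero => intro l cur acc h; omega
  | succ fuel ih =>
    intro l cur acc h
    cases l with
    | nil => simp [PySem.Chars.splitOn.go]
    | cons x rest =>
      simp only [PySem.Chars.splitOn.go, List.isPrefixOf, List.splitOnP_cons]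
      by_cases hc : c = x
      · subst hc
        simp only [BEq.rfl, Bool.and_true, if_pos, List.length_singleton,
          List.drop_succ_cons, List.drop_zero]
        rw [ih rest [] (cur.reverse :: acc) (by simpa using Nat.lt_of_succ_lt_succ h)]
        cases List.splitOnP (fun x => x == c) rest <;> simp
      · have hb : (c == x) = false := by simp [hc]
        have hb' : (x == c) = false := by simp [Ne.symm hc]
        simp only [hb, hb', Bool.false_and, Bool.false_eq_true, if_false]
        rw [ih rest (x :: cur) acc (by simpa using Nat.lt_of_succ_lt_succ h)]
        rw [List.modifyHead_modifyHead]
        simp [Function.comp_def]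

theorem splitOn_single (c : Char) (s : List Char) :
    PySem.Chars.splitOn s [c] = List.splitOnP (· == c) s := by
  rw [PySem.Chars.splitOn, splitOn_go_eq c (s.length + 1) s [] [] (Nat.lt_succ_self _)]
  cases List.splitOnP (fun x => x == c) s <;> simp

-- whitespace characters are fixed by lower-casing
theorem lowerChar_of_isspace {c : Char} (h : PySem.Chars.isspace c = true) :
    PySem.Chars.lowerChar c = c := by
  unfold PySem.Chars.lowerChar
  have hu : PySem.Chars.isupper c = false := by
    unfold PySem.Chars.isspace at h
    unfold PySem.Chars.isupper
    simp only [decide_eq_true_eq, Bool.or_eq_true, Bool.and_eq_true] at h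
    have hA : ('A' ≤ c) = (65 ≤ c.toNat) := by
      simp only [Char.le_def, Char.toNat, UInt32.le_iff_toNat_le]
      have h65 : 'A'.val.toNat = 65 := rfl
      rw [eq_iff_iff]; omega
    have hZ : (c ≤ 'Z') = (c.toNat ≤ 90) := by
      simp only [Char.le_def, Char.toNat, UInt32.le_iff_toNat_le]
      have h90 : 'Z'.val.toNat = 90 := rfl
      rw [eq_iff_iff]; omega
    rw [Bool.and_eq_false_iff]
    rcases Nat.lt_or_ge c.toNat 65 with hlt | hge
    · left; rw [decide_eq_false_iff_not, hA]; omega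
    · right; rw [decide_eq_false_iff_not, hZ]; omega
  simp [hu]

theorem lower_npl_pend (cur : List Char) :
    PySem.Chars.lower (npl_pend cur) = npl_pend cur := by
  unfold PySem.Chars.lower npl_pend
  rw [List.map_reverse]
  congr 1
  conv_rhs => rw [← List.map_id (List.takeWhile PySem.Chars.isspace (PySem.Chars.lstrip cur).reverse)]
  exact List.map_congr_left (fun x hx => lowerChar_of_isspace (List.mem_takeWhile_imp hx))

-- strip is empty iff lstrip is empty
theorem strip_isEmpty_iff (cur : List Char) :
    PySem.Chars.strip cur = [] ↔ PySem.Chars.lstrip cur = [] := by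
  unfold PySem.Chars.strip PySem.Chars.rstrip
  constructor
  · intro h
    have hall : ∀ x ∈ (PySem.Chars.lstrip cur).reverse, PySem.Chars.isspace x := by
      rw [← List.dropWhile_eq_nil_iff]
      simpa using h
    by_contra hne
    have hh : List.dropWhile PySem.Chars.isspace cur ≠ [] := by
      unfold PySem.Chars.lstrip at hne; exact hne
    have hf := List.head_dropWhile_not (p := PySem.Chars.isspace) (l := cur) hh
    have ht := hall _ (by rw [List.mem_reverse]; exact List.head_mem hh)
    unfold PySem.Chars.lstrip at ht
    rw [ht] at hf
    exact absurd hf (by simp)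
  · intro h; rw [h]; simp

-- the left-stripped token splits into the stripped token and its whitespace suffix
theorem lstrip_eq_strip_append_pend (cur : List Char) :
    PySem.Chars.lstrip cur = PySem.Chars.strip cur ++ npl_pend cur := by
  unfold npl_pend PySem.Chars.strip PySem.Chars.rstrip
  conv_lhs => rw [← List.reverse_reverse (PySem.Chars.lstrip cur),
    ← List.takeWhile_append_dropWhile (p := PySem.Chars.isspace) (l := (PySem.Chars.lstrip cur).reverse)]
  rw [List.reverse_append]

-- appending a whitespace character: strip unchanged, pend grows iff a token is open
theorem strip_append_ws (cur : List Char) {ch : Char} (h : PySem.Chars.isspace ch = true) :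
    PySem.Chars.strip (cur ++ [ch]) = PySem.Chars.strip cur := by
  unfold PySem.Chars.strip PySem.Chars.lstrip PySem.Chars.rstrip
  rw [List.dropWhile_append]
  by_cases he : (List.dropWhile PySem.Chars.isspace cur).isEmpty
  · simp only [List.isEmpty_iff] at he
    simp [he, h]
  · simp only [he, if_false, Bool.false_eq_true, List.reverse_append, List.reverse_cons,
      List.reverse_nil, List.nil_append, List.singleton_append, List.dropWhile_cons, h, if_pos]

theorem pend_append_ws (cur : List Char) {ch : Char} (h : PySem.Chars.isspace ch = true) :
    npl_pend (cur ++ [ch]) =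
      if (PySem.Chars.strip cur).isEmpty then [] else npl_pend cur ++ [ch] := by
  unfold npl_pend
  by_cases he : PySem.Chars.lstrip cur = []
  · have hs : (PySem.Chars.strip cur).isEmpty = true := by
      simp [(strip_isEmpty_iff cur).2 he]
    rw [hs]
    unfold PySem.Chars.lstrip at he ⊢
    rw [List.dropWhile_append, he]
    simp [h]
  · have hs : (PySem.Chars.strip cur).isEmpty = false := by
      simp only [List.isEmpty_eq_false_iff]
      intro hc; exact he ((strip_isEmpty_iff cur).1 hc)
    rw [hs]
    simp only [if_false, Bool.false_eq_true]
    unfold PySem.Chars.lstrip at he ⊢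
    rw [List.dropWhile_append]
    simp only [List.isEmpty_iff, he, if_false]
    simp only [List.reverse_append, List.reverse_cons, List.reverse_nil, List.nil_append,
      List.singleton_append, List.takeWhile_cons, h, if_pos, List.reverse_cons]

-- appending a non-whitespace character: the stripped token grows by pend + the char
theorem lstrip_append_nonws (cur : List Char) {ch : Char} (h : PySem.Chars.isspace ch = false) :
    PySem.Chars.lstrip (cur ++ [ch]) = PySem.Chars.lstrip cur ++ [ch] := by
  unfold PySem.Chars.lstrip
  rw [List.dropWhile_append]
  by_cases he : (List.dropWhile PySem.Chars.isspace cur).isEmpty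
  · simp only [List.isEmpty_iff] at he
    simp [he, h]
  · simp [he]

theorem strip_append_nonws (cur : List Char) {ch : Char} (h : PySem.Chars.isspace ch = false) :
    PySem.Chars.strip (cur ++ [ch]) = PySem.Chars.strip cur ++ npl_pend cur ++ [ch] := by
  unfold PySem.Chars.strip
  rw [lstrip_append_nonws cur h]
  unfold PySem.Chars.rstrip
  rw [List.reverse_append, List.reverse_cons, List.reverse_nil, List.nil_append,
    List.singleton_append, List.dropWhile_cons, h]
  simp only [Bool.false_eq_true, if_false, List.reverse_cons, List.reverse_reverse]
  have hthis := lstrip_eq_strip_append_pend cur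
  unfold PySem.Chars.strip PySem.Chars.rstrip at hthis
  conv_lhs => rw [hthis]

theorem pend_append_nonws (cur : List Char) {ch : Char} (h : PySem.Chars.isspace ch = false) :
    npl_pend (cur ++ [ch]) = [] := by
  unfold npl_pend
  rw [lstrip_append_nonws cur h]
  rw [List.reverse_append, List.reverse_cons, List.reverse_nil, List.nil_append,
    List.singleton_append, List.takeWhile_cons, h]
  simp

-- one emitted field
theorem npl_emit_cons (a : List Char) (fs : List (List Char)) :
    npl_emit (a :: fs) =
      (if (PySem.Chars.lower (PySem.Chars.strip a)).isEmpty then []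
       else [String.ofList (PySem.Chars.lower (PySem.Chars.strip a))]) ++ npl_emit fs := by
  unfold npl_emit
  by_cases he : (PySem.Chars.lower (PySem.Chars.strip a)).isEmpty <;> simp [he]

-- the scan invariant: scanning s with a partially read raw token cur
theorem npl_scan_inv (s : List Char) :
    ∀ (cur : List Char) (out : List String) (buf pend : List Char),
      buf = PySem.Chars.lower (PySem.Chars.strip cur) → pend = npl_pend cur →
      (fun st : List String × List Char × List Char =>
        if st.2.1.isEmpty then st.1 else st.1 ++ [String.ofList st.2.1])
        (s.foldl npl_step (out, buf, pend)) =
      out ++ npl_emit ((List.splitOnP (· == ',') s).modifyHead (cur ++ ·)) := by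
  induction s with
  | nil =>
    intro cur out buf pend hbuf hpend
    subst hbuf
    simp only [List.foldl_nil, List.splitOnP_nil, List.modifyHead, List.append_nil]
    rw [npl_emit_cons]
    by_cases he : (PySem.Chars.lower (PySem.Chars.strip cur)).isEmpty <;>
      simp [he, npl_emit]
  | cons ch rest ih =>
    intro cur out buf pend hbuf hpend
    rw [List.foldl_cons]
    by_cases hc : ch = ','
    · subst hc
      have hstep : npl_step (out, buf, pend) ',' =
          ((if buf.isEmpty then out else out ++ [String.ofList buf]), [], []) := by
        simp [npl_step]
      rw [hstep, ih [] _ [] [] rfl rfl]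
      rw [List.splitOnP_cons]
      simp only [BEq.rfl, if_pos]
      have hmod : (List.splitOnP (· == ',') rest).modifyHead (([] : List Char) ++ ·) =
          List.splitOnP (· == ',') rest := by
        cases List.splitOnP (· == ',') rest <;> simp
      rw [hmod]
      simp only [List.modifyHead, List.append_nil]
      rw [npl_emit_cons, hbuf]
      by_cases he : (PySem.Chars.lower (PySem.Chars.strip cur)).isEmpty <;> simp [he]
    · have hcomp : ∀ fs : List (List Char),
          (fs.modifyHead (ch :: ·)).modifyHead (cur ++ ·) =
            fs.modifyHead ((cur ++ [ch]) ++ ·) := by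
        intro fs; cases fs <;> simp
      have hpch : (ch == ',') = false := by simp [hc]
      by_cases hw : PySem.Chars.isspace ch
      · have hstep : npl_step (out, buf, pend) ch =
            (out, buf, if buf.isEmpty then pend else pend ++ [ch]) := by
          simp [npl_step, hc, hw]
        have hbuf' : buf = PySem.Chars.lower (PySem.Chars.strip (cur ++ [ch])) := by
          rw [strip_append_ws cur hw]; exact hbuf
        have hpend' : (if buf.isEmpty then pend else pend ++ [ch]) = npl_pend (cur ++ [ch]) := by
          rw [pend_append_ws cur hw]
          have hbe : buf.isEmpty = (PySem.Chars.strip cur).isEmpty := by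
            rw [hbuf]; simp [PySem.Chars.lower]
          rw [hbe, hpend]
          by_cases hs : (PySem.Chars.strip cur).isEmpty
          · have hp0 : npl_pend cur = [] := by
              unfold npl_pend
              rw [(strip_isEmpty_iff cur).1 (by simpa [List.isEmpty_iff] using hs)]
              simp
            simp [hs, hp0]
          · simp [hs]
        rw [hstep, ih (cur ++ [ch]) out _ _ hbuf' hpend'.symm.symm]
        rw [List.splitOnP_cons]
        simp only [hpch, Bool.false_eq_true, if_false]
        rw [hcomp]
      · have hw' : PySem.Chars.isspace ch = false := by simpa using hw
        have hstep : npl_step (out, buf, pend) ch =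
            (out, buf ++ pend ++ [PySem.Chars.lowerChar ch], []) := by
          simp [npl_step, hc, hw]
        have hbuf' : buf ++ pend ++ [PySem.Chars.lowerChar ch] =
            PySem.Chars.lower (PySem.Chars.strip (cur ++ [ch])) := by
          rw [strip_append_nonws cur hw']
          simp only [PySem.Chars.lower, List.map_append]
          rw [hbuf, hpend]
          have hlp := lower_npl_pend cur
          simp only [PySem.Chars.lower] at hlp
          rw [hlp]
          simp [PySem.Chars.lower]
        have hpend' : ([] : List Char) = npl_pend (cur ++ [ch]) :=
          (pend_append_nonws cur hw').symm
        rw [hstep, ih (cur ++ [ch]) out _ _ hbuf' hpend']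
        rw [List.splitOnP_cons]
        simp only [hpch, Bool.false_eq_true, if_false]
        rw [hcomp]

-- B's per-value scan appends exactly A's per-value contribution
theorem npl_scanValue_eq (out : List String) (v : String) :
    npl_scanValue out v = out ++ npl_emit (List.splitOnP (· == ',') v.toList) := by
  have h := npl_scan_inv v.toList [] out [] [] rfl rfl
  have hmod : (List.splitOnP (· == ',') v.toList).modifyHead (([] : List Char) ++ ·) =
      List.splitOnP (· == ',') v.toList := by
    cases List.splitOnP (· == ',') v.toList <;> simp
  rw [hmod] at h
  exact h

-- B's outer fold flattens the per-value contributions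
theorem npl_foldl_scan (vs : List String) :
    ∀ out, vs.foldl npl_scanValue out =
      out ++ vs.flatMap (fun v => npl_emit (List.splitOnP (· == ',') v.toList)) := by
  induction vs with
  | nil => intro out; simp
  | cons v vs ih =>
    intro out
    rw [List.foldl_cons, npl_scanValue_eq, ih]
    simp

-- ===== VERDICT (by name: the statement is the Claim_ definition above) =====
theorem normalize_provider_list_spec : Claim_equal_normalize_provider_list := by
  intro values _
  unfold Spec_normalize_provider_list normalize_provider_list normalize_provider_list_alt
  cases values with
  | none => rfl
  | some vs =>
    by_cases h : vs.isEmpty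
    · simp [h]
    · simp only [h, if_false, Bool.false_eq_true]
      rw [npl_foldl_scan vs []]
      rw [PySem.List.foldl_append_eq_flatMap]
      simp only [List.nil_append]
      have hfun : (fun value : String =>
          (((PySem.Chars.splitOn value.toList [',']).map
            (fun part => PySem.Chars.lower (PySem.Chars.strip part))).filter
              (fun part => !part.isEmpty)).map String.ofList) =
          (fun v : String => npl_emit (List.splitOnP (· == ',') v.toList)) := by
        funext value
        rw [splitOn_single]
        rfl
      rw [hfun]
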